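-- pv_equiv track=rewrite | github.com/ibaaj/explainability-of-possibilistic-rule-based-systems | example-1/equations.py | buildDi
-- ===== SOURCE A (Python) =====
-- strmap = {
--     "0": "₀", "1": "₁", "2": "₂", "3": "₃", "4": "₄", "5": "₅", "6": "₆",
--     "7": "₇", "8": "₈", "9": "₉", "10":"₁₀",
--
--     "lambda": "\u03BB", "alpha": "\u03B1", "beta": "\u03B2", "rho": "\u03C1",
--     "Qbar" : u'Q\u0305', 'bar' : u'\u0305',
--     "in" : 	u"\u2208", "pi" : u"\u03C0", "notequal" : u"\u2260",
--     "tau" : u"\u03C4"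
-- }
--
-- def nbAsStrSub(nb):
--     return ''.join([strmap[c] for c in str(nb)])
--
-- def buildmatrix(matrix,letter1,letter2,n,mode,i = 1):
--     if i == 1:
--         if mode == "uplet":
--             matrix = [(letter1 + nbAsStrSub(1),),(letter2 + nbAsStrSub(1),)]
--         if mode == "func":
--             matrix = [letter1 + nbAsStrSub(1),letter2 + nbAsStrSub(1)]
--     else:
--         matrix1 = []
--         matrix2 = []
--         for x in matrix:
--             l1 = x
--             l2 = x
--             if mode == "uplet":
--                 l1 = l1 + (letter1 + nbAsStrSub(i),)
--                 l2 = l2 + (letter2 + nbAsStrSub(i),)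
--             if mode == "func":
--                 l1 = l1 + letter1 + nbAsStrSub(i)
--                 l2 = l2 + letter2 + nbAsStrSub(i)
--
--             matrix1.append(l1)
--             matrix2.append(l2)
--         matrix = matrix1 + matrix2
--
--     if i == n:
--         return matrix
--     else:
--         return buildmatrix(matrix,letter1,letter2,n,mode,i+1)
--
-- def buildBi(n,x1,y1,x2,y2):
--     m1 = buildmatrix([],x1,y1,n,"uplet")
--     m2 = buildmatrix([],x2,y2,n,"uplet")
--
--     Bi = []
--     for x1,x2 in zip(m1,m2):
--         l = []
--         for y1,y2 in zip(x1,x2):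
--             r = ('max', y1, y2)
--             l.append(r)
--         Bi.append(l.copy())
--     return Bi
--
-- def buildOV(n,x1,y1,x2,y2):
--     Bi = buildBi(n,x1,y1,x2,y2)
--     OV = []
--     for x in Bi:
--         l = ("min",x)
--         OV.append(l)
--     return OV
--
-- def setAlphaBeta(matrix,terminaison):
--     nmatrix = []
--     for x in matrix:
--         l = len(x[1])
--         i = 0
--         c = ("min",)
--         for z in x[1]:
--             if z[1][0] == "s" and z[2][0] == strmap["lambda"]:
--                 c = c + (strmap["alpha"]+terminaison + z[1][1:],)
--             if z[1][0] == "r" and z[2][0] == strmap["rho"]: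
--                 c = c + (strmap["beta"]+terminaison + z[1][1:],)
--             i+=1
--             if i == l:
--                 nmatrix.append(c)
--     return nmatrix
--
-- def buildOVAlphaBeta(n, terminaison=""):
--     return setAlphaBeta(buildOV(n,"s",
--             "r" ,
--              strmap["lambda"],
--               strmap["rho"]), terminaison)
--
-- def buildCrond(n, terminaison=""):
--     return buildmatrix([],"Q" + terminaison,strmap["Qbar"] + terminaison,n,"func")
--
-- def buildDi(n, terminaison=""):
--     OV = buildOVAlphaBeta(n, terminaison)
--     Crondi = buildCrond(n, terminaison)
--
--     m = []
--     for x1,x2 in zip(OV,Crondi):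
--         l = "min" + str(x1[1:]) + "*" + str(x2)
--         m.append(l)
--     return m
-- ===== SOURCE B (Python) =====
-- _SUB = {"0": "\u2080", "1": "\u2081", "2": "\u2082", "3": "\u2083",
--         "4": "\u2084", "5": "\u2085", "6": "\u2086", "7": "\u2087",
--         "8": "\u2088", "9": "\u2089"}
--
-- def _sub(nb):
--     return ''.join(_SUB[c] for c in str(nb))
--
-- def buildDi(n, terminaison=""):
--     out = []
--     for r in range(1 << n):
--         alphas = []
--         q = ""
--         for i in range(1, n + 1):
--             s = terminaison + _sub(i)
--             if (r >> (i - 1)) & 1: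
--                 alphas.append("\u03b2" + s)
--                 q += "Q\u0305" + s
--             else:
--                 alphas.append("\u03b1" + s)
--                 q += "Q" + s
--         out.append("min" + str(tuple(alphas)) + "*" + q)
--     return out
-- ===== Notes on version B (the rewrite author's own statement) =====
-- stated objective: alternative
-- what changed: Replaces the recursive matrix-doubling pipeline (buildmatrix/buildBi/buildOV/setAlphaBeta/zip) by one direct pass that enumerates the 2^n rows and reads each alpha/beta and Q/Qbar choice off the bits of the row index, building every equation string immediately with no intermediate matrices.
import Mathlib
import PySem

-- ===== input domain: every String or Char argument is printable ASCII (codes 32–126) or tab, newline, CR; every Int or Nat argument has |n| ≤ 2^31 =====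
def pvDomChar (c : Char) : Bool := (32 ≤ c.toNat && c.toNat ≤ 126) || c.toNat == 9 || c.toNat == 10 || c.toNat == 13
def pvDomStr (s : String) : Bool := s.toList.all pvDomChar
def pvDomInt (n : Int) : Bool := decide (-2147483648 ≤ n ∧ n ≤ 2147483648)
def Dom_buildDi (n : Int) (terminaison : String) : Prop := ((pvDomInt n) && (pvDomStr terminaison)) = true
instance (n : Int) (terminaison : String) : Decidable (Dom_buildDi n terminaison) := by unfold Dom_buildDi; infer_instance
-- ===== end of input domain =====

-- B replaces A's recursive doubling of intermediate matrices by a single direct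
-- enumeration of the 2^n rows, reading each α/β and Q/Q̄ choice off the bits of the
-- row index (objective: alternative single-pass algorithm, no intermediate matrices).

-- ===== PORT A =====

-- strmap digit lookup (only the single-digit keys are reachable from str(i), i ≥ 1)
def digitSub (c : Char) : String :=
  if c = '0' then "₀" else if c = '1' then "₁" else if c = '2' then "₂"
  else if c = '3' then "₃" else if c = '4' then "₄" else if c = '5' then "₅"
  else if c = '6' then "₆" else if c = '7' then "₇" else if c = '8' then "₈"
  else if c = '9' then "₉" else ""

def nbAsStrSub (nb : Int) : String :=
  String.join (((PySem.Int.toStr nb).toList.map digitSub))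

-- Python's repr() of a str, exact on the character set reachable here
-- (printable ASCII plus tab/newline/CR in terminaison, and the fixed Greek/subscript
-- letters, all printable so repr keeps them verbatim).
def pyReprChars (cs : List Char) : List Char :=
  let q : Char := if cs.contains '\'' && !(cs.contains '"') then '"' else '\''
  q :: cs.flatMap (fun c =>
    if c = '\\' then ['\\','\\']
    else if c = q then ['\\', q]
    else if c = '\t' then ['\\','t']
    else if c = '\n' then ['\\','n']
    else if c = '\r' then ['\\','r']
    else [c]) ++ [q]

def pyReprStr (s : String) : String := String.ofList (pyReprChars s.toList)

-- Python's str() of a tuple of strings (both Pythons call the same builtin)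
def pyStrTuple (xs : List String) : String :=
  match xs with
  | [x] => "(" ++ pyReprStr x ++ ",)"
  | _ => "(" ++ String.intercalate ", " (xs.map pyReprStr) ++ ")"

-- buildmatrix in mode "uplet" (tuples become lists of strings); fuel counts the
-- remaining recursive calls: the top-level call passes (n-1).toNat, exactly the
-- number Python makes before i reaches n, so the fuel-0 fallback is unreachable
-- inside Pre_ (for n ≤ 0 Python recurses forever instead).
def buildmatrixUplet (matrix : List (List String)) (letter1 letter2 : String) (n i : Int)
    (fuel : Nat) : List (List String) :=
  let m := if i = 1 then [[letter1 ++ nbAsStrSub 1], [letter2 ++ nbAsStrSub 1]]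
           else (matrix.map (fun x => x ++ [letter1 ++ nbAsStrSub i]))
                ++ (matrix.map (fun x => x ++ [letter2 ++ nbAsStrSub i]))
  if i = n then m
  else match fuel with
       | 0 => m
       | fuel + 1 => buildmatrixUplet m letter1 letter2 n (i+1) fuel

-- buildmatrix in mode "func" (string concatenation); same fuel convention
def buildmatrixFunc (matrix : List String) (letter1 letter2 : String) (n i : Int)
    (fuel : Nat) : List String :=
  let m := if i = 1 then [letter1 ++ nbAsStrSub 1, letter2 ++ nbAsStrSub 1]
           else (matrix.map (fun x => x ++ (letter1 ++ nbAsStrSub i)))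
                ++ (matrix.map (fun x => x ++ (letter2 ++ nbAsStrSub i)))
  if i = n then m
  else match fuel with
       | 0 => m
       | fuel + 1 => buildmatrixFunc m letter1 letter2 n (i+1) fuel

def buildBi (n : Int) (x1 y1 x2 y2 : String) : List (List (String × String × String)) :=
  let m1 := buildmatrixUplet [] x1 y1 n 1 (n-1).toNat
  let m2 := buildmatrixUplet [] x2 y2 n 1 (n-1).toNat
  (m1.zip m2).map (fun p => (p.1.zip p.2).map (fun q => ("max", q.1, q.2)))

def buildOV (n : Int) (x1 y1 x2 y2 : String) : List (String × List (String × String × String)) :=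
  (buildBi n x1 y1 x2 y2).map (fun x => ("min", x))

-- z[1][0] / z[2][0] are head? here; the strings are letter++subscript, never empty,
-- so the Python IndexError on "" is unreachable.
def setAlphaBeta (matrix : List (String × List (String × String × String))) (t : String) :
    List (List String) :=
  matrix.foldl (fun nmatrix x =>
    let l := x.2.length
    (x.2.foldl (fun (s : List String × Nat × List (List String)) z =>
        let c := s.1
        let c := if z.2.1.toList.head? = some 's' ∧ z.2.2.toList.head? = some 'λ'
                 then c ++ ["α" ++ t ++ String.ofList (z.2.1.toList.drop 1)] else c
        let c := if z.2.1.toList.head? = some 'r' ∧ z.2.2.toList.head? = some 'ρ'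
                 then c ++ ["β" ++ t ++ String.ofList (z.2.1.toList.drop 1)] else c
        let i := s.2.1 + 1
        let nm := if i = l then s.2.2 ++ [c] else s.2.2
        (c, i, nm))
      (["min"], 0, nmatrix)).2.2) []

def buildOVAlphaBeta (n : Int) (terminaison : String) : List (List String) :=
  setAlphaBeta (buildOV n "s" "r" "λ" "ρ") terminaison

def buildCrond (n : Int) (terminaison : String) : List String :=
  buildmatrixFunc [] ("Q" ++ terminaison) ("Q\u0305" ++ terminaison) n 1 (n-1).toNat

def buildDi (n : Int) (terminaison : String) : List String :=
  let OV := buildOVAlphaBeta n terminaison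
  let Crondi := buildCrond n terminaison
  (OV.zip Crondi).map (fun p => "min" ++ pyStrTuple (p.1.drop 1) ++ "*" ++ p.2)

-- ===== PORT B =====

-- Source B's _sub is the same digit-subscript join as A's nbAsStrSub; the port shares it.
def buildDi_alt (n : Int) (terminaison : String) : List String :=
  (List.range (2 ^ n.toNat)).map (fun r =>
    let p := (List.range n.toNat).foldl
      (fun (acc : List String × String) (j : Nat) =>
        let s := terminaison ++ nbAsStrSub (Int.ofNat j + 1)
        if (r >>> j) &&& 1 = (1 : Nat) then (acc.1 ++ ["β" ++ s], acc.2 ++ ("Q\u0305" ++ s))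
        else (acc.1 ++ ["α" ++ s], acc.2 ++ ("Q" ++ s)))
      ([], "")
    "min" ++ pyStrTuple p.1 ++ "*" ++ p.2)

-- ===== PRECONDITION & SPEC =====
-- Pre_ excludes n ≤ 0, where Python A never returns: buildmatrix recurses without
-- bound (RecursionError).
def Pre_buildDi (n : Int) (terminaison : String) : Prop := 1 ≤ n
instance (n : Int) (terminaison : String) : Decidable (Pre_buildDi n terminaison) := by
  unfold Pre_buildDi; infer_instance

def pvWitness_buildDi : Int × String := (2, "x")

def Spec_buildDi (n : Int) (terminaison : String) (out : List String) : Prop :=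
  out = buildDi_alt n terminaison
instance (n : Int) (terminaison : String) (out : List String) : Decidable (Spec_buildDi n terminaison out) := by
  unfold Spec_buildDi; infer_instance

-- ===== CLAIM (what is proved, stated in full; the proofs are below) =====
def Claim_equal_buildDi : Prop := ∀ (n : Int) (terminaison : String), Dom_buildDi n terminaison → Pre_buildDi n terminaison → Spec_buildDi n terminaison (buildDi n terminaison)

-- ===== LEMMAS AND PROOFS =====

-- canonical per-index pieces
def subN (j : Nat) : String := nbAsStrSub (Int.ofNat j + 1)

def uRow (a b : String) (k r : Nat) : List String :=
  (List.range k).map (fun j => (if r / 2^j % 2 = 1 then b else a) ++ subN j)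

def fStr (a b : String) (k r : Nat) : String :=
  (List.range k).foldl (fun acc j => acc ++ ((if r / 2^j % 2 = 1 then b else a) ++ subN j)) ""

theorem bit_low (k j s : Nat) (hj : j < k) :
    (2^k + s) / 2^j % 2 = s / 2^j % 2 := by
  have h2 : 2^k = 2^j * (2 * 2^(k-j-1)) := by
    rw [← pow_succ', ← pow_add]; congr 1; omega
  rw [h2, Nat.mul_add_div (Nat.two_pow_pos j)]
  omega

theorem bit_high (k s : Nat) (hs : s < 2^k) : (2^k + s) / 2^k % 2 = 1 := by
  have : (2^k + s) / 2^k = 1 + s / 2^k := by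
    rw [show 2^k + s = 2^k * 1 + s by ring, Nat.mul_add_div (Nat.two_pow_pos k)]
  rw [this, Nat.div_eq_of_lt hs]

theorem uRow_low (a b : String) (k r : Nat) (h : r < 2^k) :
    uRow a b (k+1) r = uRow a b k r ++ [a ++ subN k] := by
  simp [uRow, List.range_succ, Nat.div_eq_of_lt h]

theorem uRow_high (a b : String) (k s : Nat) (h : s < 2^k) :
    uRow a b (k+1) (2^k + s) = uRow a b k s ++ [b ++ subN k] := by
  simp only [uRow, List.range_succ, List.map_append, List.map_cons, List.map_nil]
  rw [bit_high k s h]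
  congr 1
  exact List.map_congr_left fun j hj => by
    rw [bit_low k j s (List.mem_range.mp hj)]

theorem uRow_dbl (a b : String) (k : Nat) :
    (List.range (2^(k+1))).map (uRow a b (k+1)) =
      ((List.range (2^k)).map (uRow a b k)).map (fun x => x ++ [a ++ subN k])
      ++ ((List.range (2^k)).map (uRow a b k)).map (fun x => x ++ [b ++ subN k]) := by
  rw [show 2^(k+1) = 2^k + 2^k by ring, List.range_add, List.map_append]
  congr 1
  · rw [List.map_map]
    exact List.map_congr_left fun r hr => uRow_low a b k r (List.mem_range.mp hr)
  · rw [List.map_map, List.map_map]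
    exact List.map_congr_left fun s hs => uRow_high a b k s (List.mem_range.mp hs)

theorem fStr_low (a b : String) (k r : Nat) (h : r < 2^k) :
    fStr a b (k+1) r = fStr a b k r ++ (a ++ subN k) := by
  simp [fStr, List.range_succ, Nat.div_eq_of_lt h]

theorem fStr_high (a b : String) (k s : Nat) (h : s < 2^k) :
    fStr a b (k+1) (2^k + s) = fStr a b k s ++ (b ++ subN k) := by
  simp only [fStr, List.range_succ, List.foldl_append, List.foldl_cons, List.foldl_nil]
  rw [bit_high k s h]
  congr 1
  apply PySem.List.foldl_congr_mem
  intro acc j hj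
  rw [bit_low k j s (List.mem_range.mp hj)]

theorem fStr_dbl (a b : String) (k : Nat) :
    (List.range (2^(k+1))).map (fStr a b (k+1)) =
      ((List.range (2^k)).map (fStr a b k)).map (fun x => x ++ (a ++ subN k))
      ++ ((List.range (2^k)).map (fStr a b k)).map (fun x => x ++ (b ++ subN k)) := by
  rw [show 2^(k+1) = 2^k + 2^k by ring, List.range_add, List.map_append]
  congr 1
  · rw [List.map_map]
    exact List.map_congr_left fun r hr => fStr_low a b k r (List.mem_range.mp hr)
  · rw [List.map_map, List.map_map]
    exact List.map_congr_left fun s hs => fStr_high a b k s (List.mem_range.mp hs)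

theorem uplet_run (a b : String) (nI : Int) :
    ∀ (m : Nat) (i : Int) (M : List (List String)), 2 ≤ i → i ≤ nI → nI - i = (m : Int) →
      M = (List.range (2^(i-1).toNat)).map (uRow a b (i-1).toNat) →
      buildmatrixUplet M a b nI i m = (List.range (2^nI.toNat)).map (uRow a b nI.toNat) := by
  intro m
  induction m with
  | zero =>
    intro i M h2 hle hm hM
    have hin : i = nI := by omega
    rw [buildmatrixUplet]
    have hi1 : ¬ i = 1 := by omega
    have hk : (i-1).toNat + 1 = i.toNat := by omega
    have hsub : nbAsStrSub i = subN (i-1).toNat := by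
      unfold subN; congr 1; simp only [Int.ofNat_eq_natCast]; omega
    simp only [if_neg hi1, if_pos hin, hM, hsub]
    rw [← uRow_dbl, hk, hin]
  | succ m ih =>
    intro i M h2 hle hm hM
    have hin : ¬ i = nI := by omega
    have hi1 : ¬ i = 1 := by omega
    have hk : (i-1).toNat + 1 = i.toNat := by omega
    have hsub : nbAsStrSub i = subN (i-1).toNat := by
      unfold subN; congr 1; simp only [Int.ofNat_eq_natCast]; omega
    rw [buildmatrixUplet]
    simp only [if_neg hi1, if_neg hin]
    apply ih (i+1) _ (by omega) (by omega) (by omega)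
    have h3 : (i + 1 - 1).toNat = i.toNat := by omega
    rw [hM, hsub, ← uRow_dbl, hk, h3]

theorem uplet_full (a b : String) (nI : Int) (h : 1 ≤ nI) :
    buildmatrixUplet [] a b nI 1 (nI-1).toNat = (List.range (2^nI.toNat)).map (uRow a b nI.toNat) := by
  have hbase : [[a ++ nbAsStrSub 1], [b ++ nbAsStrSub 1]]
      = (List.range (2^(1:Nat))).map (uRow a b 1) := by
    have : nbAsStrSub 1 = subN 0 := by unfold subN; norm_num
    simp [uRow, List.range_succ, this]
  by_cases h1 : (1:Int) = nI
  · have hf : (nI-1).toNat = 0 := by omega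
    rw [hf, buildmatrixUplet]
    simp only [if_pos h1, hbase]
    have h2 : nI.toNat = 1 := by omega
    rw [h2]
    simp
  · have hf : (nI-1).toNat = (nI-2).toNat + 1 := by omega
    rw [hf, buildmatrixUplet]
    simp only [if_neg h1]
    apply uplet_run a b nI (nI - 2).toNat 2 _ (by omega) (by omega) (by omega)
    have h2 : ((2:Int) - 1).toNat = 1 := by omega
    rw [hbase, h2]
    simp

theorem func_run (a b : String) (nI : Int) :
    ∀ (m : Nat) (i : Int) (M : List String), 2 ≤ i → i ≤ nI → nI - i = (m : Int) →
      M = (List.range (2^(i-1).toNat)).map (fStr a b (i-1).toNat) →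
      buildmatrixFunc M a b nI i m = (List.range (2^nI.toNat)).map (fStr a b nI.toNat) := by
  intro m
  induction m with
  | zero =>
    intro i M h2 hle hm hM
    have hin : i = nI := by omega
    rw [buildmatrixFunc]
    have hi1 : ¬ i = 1 := by omega
    have hk : (i-1).toNat + 1 = i.toNat := by omega
    have hsub : nbAsStrSub i = subN (i-1).toNat := by
      unfold subN; congr 1; simp only [Int.ofNat_eq_natCast]; omega
    simp only [if_neg hi1, if_pos hin, hM, hsub]
    rw [← fStr_dbl, hk, hin]
  | succ m ih =>
    intro i M h2 hle hm hM
    have hin : ¬ i = nI := by omega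
    have hi1 : ¬ i = 1 := by omega
    have hk : (i-1).toNat + 1 = i.toNat := by omega
    have hsub : nbAsStrSub i = subN (i-1).toNat := by
      unfold subN; congr 1; simp only [Int.ofNat_eq_natCast]; omega
    rw [buildmatrixFunc]
    simp only [if_neg hi1, if_neg hin]
    apply ih (i+1) _ (by omega) (by omega) (by omega)
    have h3 : (i + 1 - 1).toNat = i.toNat := by omega
    rw [hM, hsub, ← fStr_dbl, hk, h3]

theorem func_full (a b : String) (nI : Int) (h : 1 ≤ nI) :
    buildmatrixFunc [] a b nI 1 (nI-1).toNat = (List.range (2^nI.toNat)).map (fStr a b nI.toNat) := by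
  have hbase : [a ++ nbAsStrSub 1, b ++ nbAsStrSub 1]
      = (List.range (2^(1:Nat))).map (fStr a b 1) := by
    have : nbAsStrSub 1 = subN 0 := by unfold subN; norm_num
    simp [fStr, List.range_succ, this]
  by_cases h1 : (1:Int) = nI
  · have hf : (nI-1).toNat = 0 := by omega
    rw [hf, buildmatrixFunc]
    simp only [if_pos h1, hbase]
    have h2 : nI.toNat = 1 := by omega
    rw [h2]
    simp
  · have hf : (nI-1).toNat = (nI-2).toNat + 1 := by omega
    rw [hf, buildmatrixFunc]
    simp only [if_neg h1]
    apply func_run a b nI (nI - 2).toNat 2 _ (by omega) (by omega) (by omega)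
    have h2 : ((2:Int) - 1).toNat = 1 := by omega
    rw [hbase, h2]
    simp

theorem alt_fold (A Q : Nat → String) :
    ∀ (l : List Nat) (c : List String) (q : String),
      l.foldl (fun (acc : List String × String) j => (acc.1 ++ [A j], acc.2 ++ Q j)) (c, q)
        = (c ++ l.map A, l.foldl (fun s j => s ++ Q j) q) := by
  intro l
  induction l with
  | nil => simp
  | cons x xs ih => intro c q; simp [ih]

theorem alt_char (n : Int) (t : String) :
    buildDi_alt n t = (List.range (2^n.toNat)).map (fun r =>
      "min" ++ pyStrTuple ((List.range n.toNat).map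
          (fun j => (if r / 2^j % 2 = 1 then "β" else "α") ++ (t ++ subN j))) ++ "*" ++
      (List.range n.toNat).foldl
          (fun q j => q ++ ((if r / 2^j % 2 = 1 then "Q\u0305" else "Q") ++ (t ++ subN j))) "") := by
  unfold buildDi_alt
  apply List.map_congr_left
  intro r _
  have hf : (List.range n.toNat).foldl
      (fun (acc : List String × String) (j : Nat) =>
        let s := t ++ nbAsStrSub (Int.ofNat j + 1)
        if (r >>> j) &&& 1 = (1 : Nat) then (acc.1 ++ ["β" ++ s], acc.2 ++ ("Q\u0305" ++ s))
        else (acc.1 ++ ["α" ++ s], acc.2 ++ ("Q" ++ s))) ([], "")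
    = (List.range n.toNat).foldl
      (fun (acc : List String × String) (j : Nat) =>
        (acc.1 ++ [(if r / 2^j % 2 = 1 then "β" else "α") ++ (t ++ subN j)],
         acc.2 ++ ((if r / 2^j % 2 = 1 then "Q\u0305" else "Q") ++ (t ++ subN j)))) ([], "") := by
    apply PySem.List.foldl_congr_mem
    intro acc j hj
    have hb : nbAsStrSub (Int.ofNat j + 1) = subN j := rfl
    simp only [Nat.and_one_is_mod, Nat.shiftRight_eq_div_pow, hb]
    by_cases hbit : r / 2^j % 2 = 1 <;> simp [hbit]
  simp only [hf, alt_fold]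
  simp

-- step lemma for setAlphaBeta's inner fold, on the reachable row shapes
def vVal (t : String) (z : String × String × String) : String :=
  (if z.2.1.toList.head? = some 'r' then "β" else "α") ++ t ++ String.ofList (z.2.1.toList.drop 1)

def sabStep (t : String) (l : Nat) (s : List String × Nat × List (List String))
    (z : String × String × String) : List String × Nat × List (List String) :=
  let c := s.1
  let c := if z.2.1.toList.head? = some 's' ∧ z.2.2.toList.head? = some 'λ'
           then c ++ ["α" ++ t ++ String.ofList (z.2.1.toList.drop 1)] else c
  let c := if z.2.1.toList.head? = some 'r' ∧ z.2.2.toList.head? = some 'ρ'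
           then c ++ ["β" ++ t ++ String.ofList (z.2.1.toList.drop 1)] else c
  let i := s.2.1 + 1
  let nm := if i = l then s.2.2 ++ [c] else s.2.2
  (c, i, nm)

theorem setAlphaBeta_eq (M : List (String × List (String × String × String))) (t : String) :
    setAlphaBeta M t
      = M.foldl (fun nmatrix x => (x.2.foldl (sabStep t x.2.length) (["min"], 0, nmatrix)).2.2) [] := rfl

def goodZ (z : String × String × String) : Prop :=
  (∃ w : String, z.2.1 = "s" ++ w ∧ ∃ w' : String, z.2.2 = "λ" ++ w')
  ∨ (∃ w : String, z.2.1 = "r" ++ w ∧ ∃ w' : String, z.2.2 = "ρ" ++ w')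

theorem sab_step_good (t : String) (l : Nat) (z : String × String × String) (hz : goodZ z)
    (c : List String) (i : Nat) (nm : List (List String)) :
    sabStep t l (c, i, nm) z
      = (c ++ [vVal t z], i + 1, if i + 1 = l then nm ++ [c ++ [vVal t z]] else nm) := by
  rcases hz with ⟨w, hw, w', hw'⟩ | ⟨w, hw, w', hw'⟩ <;>
    simp [sabStep, vVal, hw, hw', String.toList_append]

theorem sab_fold (t : String) (l : Nat) :
    ∀ (zs : List (String × String × String)), (∀ z ∈ zs, goodZ z) → zs ≠ [] →
      ∀ (c : List String) (i : Nat) (nm : List (List String)), i + zs.length = l →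
        (zs.foldl (sabStep t l) (c, i, nm)).2.2 = nm ++ [c ++ zs.map (vVal t)] := by
  intro zs
  induction zs with
  | nil => intro _ h; exact absurd rfl h
  | cons z zs ih =>
    intro hg _ c i nm hlen
    rw [List.foldl_cons, sab_step_good t l z (hg z (by simp))]
    cases zs with
    | nil =>
      have : i + 1 = l := by simpa using hlen
      simp [this]
    | cons z2 zs2 =>
      have hne : ¬ (i + 1 = l) := by simp at hlen; omega
      rw [if_neg hne]
      rw [ih (fun z hz => hg z (by simp [hz])) (by simp) (c ++ [vVal t z]) (i+1) nm
            (by simp at hlen ⊢; omega)]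
      simp

theorem foldl_rows {A : Type} (row : A → List String) (F : List (List String) → A → List (List String)) :
    ∀ (M : List A), (∀ nm x, x ∈ M → F nm x = nm ++ [row x]) →
      ∀ init, M.foldl F init = init ++ M.map row := by
  intro M
  induction M with
  | nil => simp
  | cons x xs ih =>
    intro h init
    rw [List.foldl_cons, h init x (by simp), ih (fun nm y hy => h nm y (by simp [hy]))]
    simp

theorem buildDi_spec : Claim_equal_buildDi := by
  intro n t _ hpre
  unfold Pre_buildDi at hpre
  unfold Spec_buildDi
  rw [alt_char]
  have hk : 1 ≤ n.toNat := by omega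
  unfold buildDi buildOVAlphaBeta buildCrond buildOV buildBi
  rw [uplet_full "s" "r" n hpre, uplet_full "λ" "ρ" n hpre, func_full _ _ n hpre]
  simp only [List.zip_map', List.map_map]
  have hOV : List.map
      ((fun x => (("min" : String), x)) ∘
        (fun (p : List String × List String) =>
            List.map (fun q => (("max" : String), q.1, q.2)) (p.1.zip p.2)) ∘ fun a =>
          (uRow "s" "r" n.toNat a, uRow "λ" "ρ" n.toNat a))
      (List.range (2 ^ n.toNat))
    = List.map (fun r => (("min" : String), (List.range n.toNat).map
        (fun j => (("max" : String),
          (if r / 2^j % 2 = 1 then "r" else "s") ++ subN j,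
          (if r / 2^j % 2 = 1 then "ρ" else "λ") ++ subN j))))
      (List.range (2^n.toNat)) := by
    apply List.map_congr_left
    intro r _
    simp [uRow, List.zip_map', List.map_map, Function.comp]
  rw [hOV, setAlphaBeta_eq]
  rw [foldl_rows (fun x => ["min"] ++ x.2.map (vVal t)) _ _ ?hrows []]
  case hrows =>
    intro nm x hx
    simp only [List.mem_map, List.mem_range] at hx
    obtain ⟨r, hr, rfl⟩ := hx
    simp only []
    rw [sab_fold t _ _ ?good (by simp; omega) ["min"] 0 nm (by simp)]
    case good =>
      intro z hz
      simp only [List.mem_map, List.mem_range] at hz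
      obtain ⟨j, hj, rfl⟩ := hz
      by_cases hbit : r / 2 ^ j % 2 = 1
      · right; exact ⟨subN j, by simp [hbit], subN j, by simp [hbit]⟩
      · left; exact ⟨subN j, by simp [hbit], subN j, by simp [hbit]⟩
  simp only [List.nil_append, List.zip_map', List.map_map]
  apply List.map_congr_left
  intro r _
  simp only [Function.comp, List.map_map, List.drop_succ_cons, List.drop_zero,
    List.cons_append, List.nil_append]
  have h1 : (List.map (vVal t ∘ fun j => (("max" : String),
          (if r / 2^j % 2 = 1 then "r" else "s") ++ subN j,
          (if r / 2^j % 2 = 1 then "ρ" else "λ") ++ subN j)) (List.range n.toNat))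
      = List.map (fun j => (if r / 2 ^ j % 2 = 1 then "β" else "α") ++ (t ++ subN j))
          (List.range n.toNat) := by
    apply List.map_congr_left
    intro j _
    by_cases hbit : r / 2 ^ j % 2 = 1 <;>
      simp [vVal, hbit, String.toList_append, String.append_assoc]
  have h2 : fStr ("Q" ++ t) ("Q̅" ++ t) n.toNat r
      = (List.range n.toNat).foldl
          (fun q j => q ++ ((if r / 2 ^ j % 2 = 1 then "Q̅" else "Q") ++ (t ++ subN j))) "" := by
    unfold fStr
    apply PySem.List.foldl_congr_mem
    intro acc j hj
    by_cases hbit : r / 2 ^ j % 2 = 1 <;> simp [hbit, String.append_assoc]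
  rw [h1, h2]
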